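-- pv_equiv track=rewrite | github.com/Kesendo/R-equals-C-Psi-squared | simulations/_f89_mixed_topology_additive.py | classify_topology
-- ===== SOURCE A (Python) =====
-- def classify_topology(bonds: list[int]) -> tuple[int, ...]:
--     """Bond set → sorted tuple of connected-component-lengths."""
--     if not bonds:
--         return ()
--     sorted_bonds = sorted(bonds)
--     components = []
--     cur_len = 1
--     for i in range(1, len(sorted_bonds)):
--         if sorted_bonds[i] == sorted_bonds[i - 1] + 1:
--             cur_len += 1
--         else:
--             components.append(cur_len)
--             cur_len = 1
--     components.append(cur_len)
--     return tuple(sorted(components))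
-- ===== SOURCE B (Python) =====
-- def classify_topology(bonds: list[int]) -> tuple[int, ...]:
--     """Bond set -> sorted tuple of connected-component-lengths.
--
--     Cut-index formulation: compute the indices where a run of consecutive
--     integers breaks, then take differences of adjacent cut indices.
--     """
--     if not bonds:
--         return ()
--     s = sorted(bonds)
--     n = len(s)
--     cuts = [0] + [i for i in range(1, n) if s[i] != s[i - 1] + 1] + [n]
--     return tuple(sorted(b - a for a, b in zip(cuts, cuts[1:])))
-- ===== Notes on version B (the rewrite author's own statement) =====
-- stated objective: alternative
-- what changed: Replaces A's run-tracking accumulator loop (cur_len plus a components list) by computing the list of cut indices where consecutive runs break and taking differences of adjacent cuts.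
import Mathlib
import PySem

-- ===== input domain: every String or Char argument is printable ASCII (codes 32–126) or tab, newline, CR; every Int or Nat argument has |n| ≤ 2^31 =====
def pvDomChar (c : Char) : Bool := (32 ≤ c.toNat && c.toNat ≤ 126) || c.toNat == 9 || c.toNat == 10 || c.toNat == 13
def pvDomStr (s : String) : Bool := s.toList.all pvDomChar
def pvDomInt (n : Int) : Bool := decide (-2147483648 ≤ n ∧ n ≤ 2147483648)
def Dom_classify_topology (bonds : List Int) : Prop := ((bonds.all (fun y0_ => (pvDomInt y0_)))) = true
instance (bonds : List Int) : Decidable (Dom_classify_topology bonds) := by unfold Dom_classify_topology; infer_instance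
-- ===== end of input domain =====

-- B replaces A's run-tracking accumulator loop by cut indices + adjacent differences (objective: alternative).

-- ===== PORT A =====
def classify_topology (bonds : List Int) : List Int :=
  if bonds = [] then []
  else
    let sorted_bonds := PySem.List.sorted bonds (fun x => x) false
    let st := (PySem.List.pyRange 1 (sorted_bonds.length : Int) 1).foldl
      (fun (st : List Int × Int) i =>
        if PySem.List.pyGetD sorted_bonds i 0 = PySem.List.pyGetD sorted_bonds (i - 1) 0 + 1 then
          (st.1, st.2 + 1)
        else (st.1 ++ [st.2], 1))
      ([], 1)
    PySem.List.sorted (st.1 ++ [st.2]) (fun x => x) false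

-- ===== PORT B =====
-- Source B's 'b - a for a, b in zip(cuts, cuts[1:])'
def pvDiffsAdj (xs : List Int) : List Int := (xs.zip xs.tail).map (fun p => p.2 - p.1)

def classify_topology_alt (bonds : List Int) : List Int :=
  if bonds = [] then []
  else
    let s := PySem.List.sorted bonds (fun x => x) false
    let n : Int := (s.length : Int)
    let cuts := [0] ++ (PySem.List.pyRange 1 n 1).filter
        (fun i => !(decide (PySem.List.pyGetD s i 0 = PySem.List.pyGetD s (i - 1) 0 + 1))) ++ [n]
    PySem.List.sorted (pvDiffsAdj cuts) (fun x => x) false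

-- ===== PRECONDITION & SPEC =====
def Spec_classify_topology (bonds : List Int) (out : List Int) : Prop := out = classify_topology_alt bonds
instance (bonds : List Int) (out : List Int) : Decidable (Spec_classify_topology bonds out) := by unfold Spec_classify_topology; infer_instance

-- ===== CLAIM (what is proved, stated in full; the proofs are below) =====
def Claim_equal_classify_topology : Prop := ∀ (bonds : List Int), Dom_classify_topology bonds → Spec_classify_topology bonds (classify_topology bonds)

-- ===== LEMMAS AND PROOFS =====

theorem pvDiffsAdj_concat (ys : List Int) (y a : Int) :
    pvDiffsAdj (y :: ys ++ [a]) = pvDiffsAdj (y :: ys) ++ [a - (y :: ys).getLast (by simp)] := by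
  induction ys generalizing y with
  | nil => simp [pvDiffsAdj]
  | cons z t ih =>
      have h1 : pvDiffsAdj (y :: (z :: t) ++ [a]) = (z - y) :: pvDiffsAdj ((z :: t) ++ [a]) := rfl
      have h2 : pvDiffsAdj (y :: z :: t) = (z - y) :: pvDiffsAdj (z :: t) := rfl
      rw [h1, show (z :: t) ++ [a] = z :: t ++ [a] from rfl, ih z, h2]
      simp

-- the core correspondence: run-tracking fold over 1..m  =  adjacent diffs of the cut list, for any p
theorem pvCore (p : Int → Bool) (k : Nat) :
    (let st := (PySem.List.pyRange 1 ((k : Int) + 1) 1).foldl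
        (fun (st : List Int × Int) i => if p i then (st.1, st.2 + 1) else (st.1 ++ [st.2], 1)) ([], 1)
     st.1 ++ [st.2])
    = pvDiffsAdj ([0] ++ (PySem.List.pyRange 1 ((k : Int) + 1) 1).filter (fun i => !(p i)) ++ [(k : Int) + 1]) := by
  induction k with
  | zero => simp [PySem.List.pyRange_one_eq_nil (by norm_num : (1:Int) ≥ 1), pvDiffsAdj]
  | succ k ih =>
      have hsplit : PySem.List.pyRange 1 ((k : Int) + 1 + 1) 1
          = PySem.List.pyRange 1 ((k : Int) + 1) 1 ++ [(k : Int) + 1] :=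
        PySem.List.pyRange_one_succ_right (by omega)
      have hcast : ((k + 1 : Nat) : Int) + 1 = ((k : Int) + 1) + 1 := by push_cast; ring
      rw [hcast, hsplit, List.foldl_append, List.filter_append]
      set st := (PySem.List.pyRange 1 ((k : Int) + 1) 1).foldl
        (fun (st : List Int × Int) i => if p i then (st.1, st.2 + 1) else (st.1 ++ [st.2], 1)) ([], 1) with hst
      set F := (PySem.List.pyRange 1 ((k : Int) + 1) 1).filter (fun i => !(p i)) with hF
      simp only at ih
      by_cases hp : p ((k : Int) + 1)
      · -- no cut at k+1: last diff grows by 1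
        simp only [List.foldl_cons, List.foldl_nil, hp, List.filter_cons, Bool.not_true,
          if_true, Bool.false_eq_true, if_false]
        simp only [List.filter_nil, List.append_nil]
        have ih' : st.1 ++ [st.2]
            = pvDiffsAdj (0 :: F) ++ [((k : Int) + 1) - (0 :: F).getLast (by simp)] := by
          rw [ih]; simpa using pvDiffsAdj_concat F 0 ((k : Int) + 1)
        have h1 : st.1 = pvDiffsAdj (0 :: F) := (List.append_inj' ih' rfl).1
        have h2 : st.2 = ((k : Int) + 1) - (0 :: F).getLast (by simp) := by
          have := (List.append_inj' ih' rfl).2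
          simpa using this
        have goalrw : pvDiffsAdj ((0 : Int) :: F ++ [(k : Int) + 1 + 1])
            = pvDiffsAdj (0 :: F) ++ [((k : Int) + 1 + 1) - (0 :: F).getLast (by simp)] := by
          simpa using pvDiffsAdj_concat F 0 ((k : Int) + 1 + 1)
        simp only [List.cons_append, List.nil_append] at goalrw ⊢
        rw [goalrw, h1, h2]
        congr 1
        simp
        ring
      · -- cut at k+1: a new component of length 1
        have hpb : p ((k : Int) + 1) = false := by simpa using hp
        simp only [List.foldl_cons, List.foldl_nil, hpb, List.filter_cons, Bool.not_false,
          Bool.false_eq_true, if_false, if_true]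
        simp only [List.filter_nil]
        have hlast : ((0 : Int) :: (F ++ [(k : Int) + 1])).getLast (by simp) = (k : Int) + 1 := by
          simp [List.getLast_cons]
        have grw : pvDiffsAdj ((0 : Int) :: (F ++ [(k : Int) + 1]) ++ [(k : Int) + 1 + 1])
            = pvDiffsAdj (0 :: (F ++ [(k : Int) + 1])) ++ [((k : Int) + 1 + 1) - ((0 : Int) :: (F ++ [(k : Int) + 1])).getLast (by simp)] :=
          pvDiffsAdj_concat (F ++ [(k : Int) + 1]) 0 ((k : Int) + 1 + 1)
        have irw : pvDiffsAdj ((0 : Int) :: F ++ [(k : Int) + 1]) = st.1 ++ [st.2] := ih.symm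
        simp only [List.cons_append, List.nil_append] at grw irw ⊢
        rw [grw, hlast, irw]
        norm_num

-- ===== VERDICT (by name: the statement is the Claim_ definition above) =====
theorem classify_topology_spec : Claim_equal_classify_topology := by
  intro bonds _
  unfold Spec_classify_topology classify_topology classify_topology_alt
  by_cases hb : bonds = []
  · simp [hb]
  · simp only [hb, if_false]
    set s := PySem.List.sorted bonds (fun x => x) false with hs
    have hlen : s.length ≠ 0 := by
      simp only [hs, PySem.List.length_sorted]
      exact fun h => hb (List.length_eq_zero_iff.mp h)
    obtain ⟨k, hk⟩ : ∃ k : Nat, s.length = k + 1 := ⟨s.length - 1, by omega⟩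
    have hkc : (s.length : Int) = (k : Int) + 1 := by rw [hk]; push_cast; ring
    rw [hkc]
    congr 1
    have := pvCore (fun i => decide (PySem.List.pyGetD s i 0 = PySem.List.pyGetD s (i - 1) 0 + 1)) k
    simpa using this
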